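-- pv_equiv track=rewrite | github.com/yustero/csb | programs/three_state/node_knockout_incan.py | steady_node_state
-- ===== SOURCE A (Python) =====
-- def steady_node_state(adj,steady_state):
--     n=len(adj)
--     dist=[]
--     som=0
--     for i in range(0,n):
--         sum=0
--         for j in range(0,n):
--             sum+=steady_state[j]*adj[j][i]
--         dist.append(sum)
--     for i in dist:
--         som+=abs(i)
--     return(dist,som)
-- ===== SOURCE B (Python) =====
-- def steady_node_state(adj, steady_state):
--     # Divide-and-conquer linear combination of rows: dist = sum over j of
--     # steady_state[j]*adj[j] computed by tree reduction (exact for ints).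
--     n = len(adj)
--
--     def comb(lo, hi):
--         # length-n vector: sum_{j in [lo, hi)} steady_state[j] * adj[j][:n]
--         if hi - lo == 0:
--             return [0] * n
--         if hi - lo == 1:
--             s = steady_state[lo]
--             row = adj[lo]
--             return [s * row[i] for i in range(n)]
--         mid = (lo + hi) // 2
--         return [a + b for a, b in zip(comb(lo, mid), comb(mid, hi))]
--
--     dist = comb(0, n)
--     som = sum(map(abs, dist))
--     return (dist, som)
-- ===== Notes on version B (the rewrite author's own statement) =====
-- stated objective: alternative
-- what changed: Replaces A's sequential nested index loops (each dist[i] accumulated by an inner scan over j) with a divide-and-conquer tree reduction: dist is computed as the linear combination of adj's rows by recursively combining row halves with elementwise zip addition (exact for integers), and som by sum(map(abs, dist)).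
import Mathlib
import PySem

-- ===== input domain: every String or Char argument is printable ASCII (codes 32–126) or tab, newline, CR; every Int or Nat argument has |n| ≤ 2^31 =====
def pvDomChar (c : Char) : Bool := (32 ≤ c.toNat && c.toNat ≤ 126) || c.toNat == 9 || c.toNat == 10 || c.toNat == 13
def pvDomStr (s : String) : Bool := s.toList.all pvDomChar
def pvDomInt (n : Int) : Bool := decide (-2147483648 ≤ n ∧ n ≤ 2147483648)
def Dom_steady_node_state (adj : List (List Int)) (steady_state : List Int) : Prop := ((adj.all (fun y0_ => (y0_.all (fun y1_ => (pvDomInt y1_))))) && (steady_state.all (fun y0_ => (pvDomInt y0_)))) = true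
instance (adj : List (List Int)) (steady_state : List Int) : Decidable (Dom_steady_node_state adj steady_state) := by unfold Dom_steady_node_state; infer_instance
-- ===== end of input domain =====

-- B computes dist as a divide-and-conquer (tree-reduction) linear combination of the
-- rows of adj instead of A's sequential nested index loops; exact for integers, same cost.

-- ===== PORT A =====
def steady_node_state (adj : List (List Int)) (steady_state : List Int) : List Int × Int :=
  let n : Int := adj.length
  let dist : List Int :=
    (PySem.List.pyRange 0 n 1).foldl (fun dist i =>
      dist ++ [(PySem.List.pyRange 0 n 1).foldl (fun s j =>
        s + PySem.List.pyGetD steady_state j 0 *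
            PySem.List.pyGetD (PySem.List.pyGetD adj j []) i 0) 0]) []
  let som : Int := dist.foldl (fun s x => s + |x|) 0
  (dist, som)

-- ===== PORT B =====
-- Python helper comb(lo, hi); lo, hi are always ≥ 0 so they are rendered as Nat
-- ((lo+hi)//2 on nonnegative ints is exactly Nat division).
def pvComb (adj : List (List Int)) (steady_state : List Int) (n : Nat) (lo hi : Nat) : List Int :=
  if hi - lo = 0 then List.replicate n 0
  else if hi - lo = 1 then
    let s := PySem.List.pyGetD steady_state (lo : Int) 0
    let row := PySem.List.pyGetD adj (lo : Int) []
    (PySem.List.pyRange 0 (n : Int) 1).map (fun i => s * PySem.List.pyGetD row i 0)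
  else
    let mid := (lo + hi) / 2
    List.zipWith (fun a b => a + b) (pvComb adj steady_state n lo mid)
                                    (pvComb adj steady_state n mid hi)
termination_by hi - lo
decreasing_by all_goals omega

def steady_node_state_alt (adj : List (List Int)) (steady_state : List Int) : List Int × Int :=
  let n : Nat := adj.length
  let dist : List Int := pvComb adj steady_state n 0 n
  let som : Int := (dist.map (fun x => |x|)).sum
  (dist, som)

-- ===== PRECONDITION & SPEC =====
-- Pre_ excludes exactly the inputs where Python A raises IndexError:
-- steady_state shorter than adj, or some row of adj shorter than adj.
def Pre_steady_node_state (adj : List (List Int)) (steady_state : List Int) : Prop :=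
  adj.length ≤ steady_state.length ∧ ∀ row ∈ adj, adj.length ≤ row.length
instance (adj : List (List Int)) (steady_state : List Int) : Decidable (Pre_steady_node_state adj steady_state) := by unfold Pre_steady_node_state; infer_instance
def pvWitness_steady_node_state : List (List Int) × List Int := ([[1, 2], [3, 4]], [1, -2])

def Spec_steady_node_state (adj : List (List Int)) (steady_state : List Int) (out : List Int × Int) : Prop := out = steady_node_state_alt adj steady_state
instance (adj : List (List Int)) (steady_state : List Int) (out : List Int × Int) : Decidable (Spec_steady_node_state adj steady_state out) := by unfold Spec_steady_node_state; infer_instance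

-- ===== CLAIM (what is proved, stated in full; the proofs are below) =====
def Claim_equal_steady_node_state : Prop := ∀ (adj : List (List Int)) (steady_state : List Int), Dom_steady_node_state adj steady_state → Pre_steady_node_state adj steady_state → Spec_steady_node_state adj steady_state (steady_node_state adj steady_state)

-- ===== LEMMAS AND PROOFS =====

theorem pyRange_range (n : Nat) :
    PySem.List.pyRange 0 (n : Int) 1 = (List.range n).map Int.ofNat := by
  rw [PySem.List.pyRange_one]
  simp [List.map_eq_flatMap]

-- A's gather loop builds exactly the list of column sums.
theorem distA_eq (adj : List (List Int)) (ss : List Int) (n : Nat) :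
    (PySem.List.pyRange 0 (n:Int) 1).foldl (fun dist i =>
      dist ++ [(PySem.List.pyRange 0 (n:Int) 1).foldl (fun s j =>
        s + PySem.List.pyGetD ss j 0 *
            PySem.List.pyGetD (PySem.List.pyGetD adj j []) i 0) 0]) []
    = (List.range n).map
        (fun k => ((List.range n).map (fun j => ss.getD j 0 * (adj.getD j []).getD k 0)).sum) := by
  rw [pyRange_range, PySem.List.foldl_append_singleton_eq_map]
  simp only [List.map_map, List.nil_append]
  refine List.map_congr_left (fun k _ => ?_)
  simp only [Function.comp]
  rw [List.foldl_map, PySem.List.foldl_add]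
  simp [PySem.List.pyGetD_natCast]

-- B's tree reduction over [lo, hi) equals the sequential sum over range' lo (hi - lo).
theorem pvComb_eq (adj : List (List Int)) (ss : List Int) (n : Nat) :
    ∀ (d lo hi : Nat), hi - lo = d →
    pvComb adj ss n lo hi
    = (List.range n).map
        (fun k => ((List.range' lo (hi - lo)).map
          (fun j => ss.getD j 0 * (adj.getD j []).getD k 0)).sum) := by
  intro d
  induction d using Nat.strong_induction_on with
  | _ d ih =>
    intro lo hi hd
    rw [pvComb]
    by_cases h0 : hi - lo = 0
    · simp [h0, List.map_const']
    · by_cases h1 : hi - lo = 1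
      · simp only [h1, if_true]
        rw [pyRange_range, List.map_map]
        refine List.map_congr_left (fun k _ => ?_)
        simp [Function.comp, PySem.List.pyGetD_natCast]
      · simp only [h0, if_false, h1, if_false]
        have hmid : lo ≤ (lo + hi) / 2 ∧ (lo + hi) / 2 ≤ hi := by omega
        set mid := (lo + hi) / 2 with hm
        rw [ih (mid - lo) (by omega) lo mid rfl, ih (hi - mid) (by omega) mid hi rfl]
        have hsplit : List.range' lo (hi - lo)
            = List.range' lo (mid - lo) ++ List.range' mid (hi - mid) := by
          have h2 : (mid - lo) + (hi - mid) = hi - lo := by omega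
          rw [← h2, ← List.range'_append_1]
          congr 2
          omega
        rw [hsplit]
        rw [List.zipWith_map, List.zipWith_self]
        refine List.map_congr_left (fun k _ => ?_)
        simp

-- ===== VERDICT (by name: the statement is the Claim_ definition above) =====
theorem steady_node_state_spec : Claim_equal_steady_node_state := by
  intro adj ss _ _
  show steady_node_state adj ss = steady_node_state_alt adj ss
  simp only [steady_node_state, steady_node_state_alt]
  have hdist :
      (PySem.List.pyRange 0 (adj.length:Int) 1).foldl (fun dist i =>
        dist ++ [(PySem.List.pyRange 0 (adj.length:Int) 1).foldl (fun s j =>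
          s + PySem.List.pyGetD ss j 0 *
              PySem.List.pyGetD (PySem.List.pyGetD adj j []) i 0) 0]) []
      = pvComb adj ss adj.length 0 adj.length := by
    rw [distA_eq adj ss adj.length, pvComb_eq adj ss adj.length adj.length 0 adj.length rfl]
    simp [List.range_eq_range']
  rw [hdist]
  congr 1
  rw [List.sum_eq_foldl, List.foldl_map]
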